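-- pv_equiv track=rewrite | github.com/sumithastir/Data-structure | day6-reverse-in-a-range.py | solve
-- ===== SOURCE A (Python) =====
-- def solve(A, B, C):
--     l = B
--     r = C
--     while l<r:
--         A[l], A[r] = A[r],A[l]
--         l+=1
--         r-=1
--     return A
-- ===== SOURCE B (Python) =====
-- def solve(A, B, C):
--     if B < C:
--         A[B:C+1] = A[B:C+1][::-1]
--     return A
-- ===== Notes on version B (the rewrite author's own statement) =====
-- stated objective: idiomatic
-- what changed: replaces the explicit two-pointer swap loop with a single slice assignment that writes the reversed segment back in one step
-- outside the precondition, e.g. on solve([1, 2, 3], -3, -1): A returns [3, 2, 1], B returns [1, 2, 3]; on solve([1, 2, 3], -1, 2): A returns [2, 1, 3], B returns [1, 2, 3]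
import Mathlib
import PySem

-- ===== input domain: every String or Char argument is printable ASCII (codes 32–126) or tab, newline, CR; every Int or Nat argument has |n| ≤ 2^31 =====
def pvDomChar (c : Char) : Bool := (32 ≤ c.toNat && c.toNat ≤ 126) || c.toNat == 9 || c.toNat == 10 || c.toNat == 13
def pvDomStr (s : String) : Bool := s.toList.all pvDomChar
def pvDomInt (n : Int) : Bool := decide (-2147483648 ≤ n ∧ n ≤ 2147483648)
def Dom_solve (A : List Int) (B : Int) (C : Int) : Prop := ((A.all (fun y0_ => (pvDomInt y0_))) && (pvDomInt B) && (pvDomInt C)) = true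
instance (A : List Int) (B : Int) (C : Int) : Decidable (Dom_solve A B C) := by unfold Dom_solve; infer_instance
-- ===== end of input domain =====

-- B replaces A's two-pointer swap loop with one slice assignment of the reversed segment;
-- equivalence is about the returned list (both Pythons also mutate A in place identically on Pre_).

-- ===== PORT A =====
-- the while loop: swap A[l], A[r], move the pointers inward (pyGetD/pySetD are exact on Pre_, where every touched index is in range)
def solveLoop (A : List Int) (l r : Int) : List Int :=
  if l < r then
    solveLoop
      (PySem.List.pySetD (PySem.List.pySetD A l (PySem.List.pyGetD A r 0)) r (PySem.List.pyGetD A l 0))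
      (l + 1) (r - 1)
  else A
termination_by (r - l).toNat
decreasing_by omega

def solve (A : List Int) (B : Int) (C : Int) : List Int :=
  solveLoop A B C

-- ===== PORT B =====
-- slice assignment A[B:C+1] = A[B:C+1][::-1]: prefix ++ reversed segment ++ suffix
def solve_alt (A : List Int) (B : Int) (C : Int) : List Int :=
  if B < C then
    PySem.List.slice A none (some B)
      ++ (PySem.List.slice A (some B) (some (C + 1))).reverse
      ++ PySem.List.slice A (some (C + 1)) none
  else A

-- ===== PRECONDITION & SPEC =====
-- Pre_ excludes calls with B < C where B is negative or C is out of range: there A either raises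
-- IndexError or reads through Python's negative-index wraparound, an accidental corner where A's
-- wrapped-around value and B's slice-clamped value are both defensible and no one would specify either.
def Pre_solve (A : List Int) (B : Int) (C : Int) : Prop :=
  B < C → (0 ≤ B ∧ C < A.length)
instance (A : List Int) (B : Int) (C : Int) : Decidable (Pre_solve A B C) := by unfold Pre_solve; infer_instance

def pvWitness_solve : List Int × Int × Int := ([1, 2, 3, 4, 5], 1, 3)

def Spec_solve (A : List Int) (B : Int) (C : Int) (out : List Int) : Prop := out = solve_alt A B C
instance (A : List Int) (B : Int) (C : Int) (out : List Int) : Decidable (Spec_solve A B C out) := by unfold Spec_solve; infer_instance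

-- ===== CLAIM (what is proved, stated in full; the proofs are below) =====
def Claim_equal_solve : Prop := ∀ (A : List Int) (B : Int) (C : Int), Dom_solve A B C → Pre_solve A B C → Spec_solve A B C (solve A B C)

-- ===== LEMMAS AND PROOFS =====

-- writing v at the index just past a prefix
theorem set_at_prefix_len (P t : List Int) (z v : Int) :
    (P ++ z :: t).set P.length v = P ++ v :: t := by
  simp

-- reading the element just past a prefix (the loop's pyGetD at a nonnegative in-range index)
theorem pyGetD_at_prefix_len (P t : List Int) (z : Int) :
    PySem.List.pyGetD (P ++ z :: t) (P.length : Int) 0 = z := by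
  rw [PySem.List.pyGetD_natCast]
  simp [List.getD]

-- the loop in segment form: reversing the middle block M between prefix P and suffix S
theorem loop_seg (M P S : List Int) :
    solveLoop (P ++ M ++ S) (P.length : Int) ((P.length : Int) + M.length - 1)
      = P ++ M.reverse ++ S := by
  match hM : M with
  | [] =>
    rw [solveLoop]
    rw [if_neg (by simp)]
    simp
  | [x] =>
    rw [solveLoop]
    rw [if_neg (by simp)]
    simp
  | x :: m :: rest =>
    have hx : m :: rest = (m :: rest).dropLast ++ [(m :: rest).getLast (by simp)] :=
      (List.dropLast_append_getLast (by simp)).symm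
    set M' : List Int := (m :: rest).dropLast with hM'
    set y : Int := (m :: rest).getLast (by simp) with hy
    have hlenM' : M'.length = rest.length := by simp [hM']
    rw [solveLoop]
    rw [if_pos (by simp; omega)]
    -- arrange the list as P ++ x :: (M' ++ y :: S)
    have hA : P ++ (x :: m :: rest) ++ S = P ++ x :: (M' ++ y :: S) := by
      rw [hx]; simp
    rw [hA]
    -- the two reads
    have hread_l : PySem.List.pyGetD (P ++ x :: (M' ++ y :: S)) (P.length : Int) 0 = x :=
      pyGetD_at_prefix_len _ _ _
    have hrIdx : (P.length : Int) + (x :: m :: rest).length - 1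
        = (((P ++ x :: M').length : Nat) : Int) := by
      simp [hlenM']; omega
    have hread_r : PySem.List.pyGetD (P ++ x :: (M' ++ y :: S))
        ((P.length : Int) + (x :: m :: rest).length - 1) 0 = y := by
      rw [hrIdx]
      rw [show P ++ x :: (M' ++ y :: S) = (P ++ x :: M') ++ y :: S by simp]
      exact pyGetD_at_prefix_len _ _ _
    rw [hread_l, hread_r]
    -- the two writes: swap x and y
    have hset : PySem.List.pySetD
        (PySem.List.pySetD (P ++ x :: (M' ++ y :: S)) (P.length : Int) y)
        ((P.length : Int) + (x :: m :: rest).length - 1) x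
        = P ++ [y] ++ M' ++ x :: S := by
      rw [PySem.List.pySetD_natCast, set_at_prefix_len]
      rw [show P ++ y :: (M' ++ y :: S) = (P ++ y :: M') ++ y :: S by simp]
      rw [show (P.length : Int) + (x :: m :: rest).length - 1
            = (((P ++ y :: M').length : Nat) : Int) by simp [hlenM']; omega]
      rw [PySem.List.pySetD_natCast, set_at_prefix_len]
      simp
    rw [hset]
    -- recurse on the shorter middle block M'
    have hrec := loop_seg M' (P ++ [y]) (x :: S)
    have hl1 : (P.length : Int) + 1 = ((P ++ [y]).length : Int) := by simp
    have hr1 : (P.length : Int) + (x :: m :: rest).length - 1 - 1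
        = ((P ++ [y]).length : Int) + (M'.length : Int) - 1 := by simp [hlenM']; omega
    rw [hl1, hr1, hrec]
    rw [hx]
    simp
termination_by M.length
decreasing_by simp

-- the loop's closed form: with both pointers in range it returns prefix ++ reversed segment ++ suffix
theorem solveLoop_eq (A : List Int) (l r : Int) (h0 : 0 ≤ l) (hr : r < A.length)
    (hlr : l ≤ r + 1) :
    solveLoop A l r =
      A.take l.toNat ++ ((A.drop l.toNat).take (r + 1 - l).toNat).reverse ++ A.drop (r + 1).toNat := by
  by_cases hlen : l ≤ A.length
  · set P : List Int := A.take l.toNat with hP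
    set M : List Int := (A.drop l.toNat).take (r + 1 - l).toNat with hMdef
    set S : List Int := A.drop (r + 1).toNat with hS
    have hPlen : P.length = l.toNat := by simp [hP]; omega
    have hMlen : M.length = (r + 1 - l).toNat := by simp [hMdef]; omega
    have hsplit : A = P ++ M ++ S := by
      rw [hP, hMdef, hS]
      rw [List.append_assoc]
      rw [show A.drop (r + 1).toNat = ((A.drop l.toNat).drop (r + 1 - l).toNat) by
        rw [List.drop_drop]; congr 1; omega]
      rw [List.take_append_drop, List.take_append_drop]
    have hl : l = ((P.length : Nat) : Int) := by rw [hPlen]; omega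
    have hr' : r = (P.length : Int) + M.length - 1 := by rw [hPlen, hMlen]; omega
    have hmain := loop_seg M P S
    rw [← hsplit, ← hr', ← hl] at hmain
    exact hmain
  · -- l past the end: the segment is empty (r + 1 ≤ l ≤ …), the loop does not run
    rw [solveLoop, if_neg (by omega)]
    have h1 : A.take l.toNat = A := List.take_of_length_le (by omega)
    have h2 : (r + 1 - l).toNat = 0 := by omega
    have h3 : A.drop (r + 1).toNat = [] := List.drop_of_length_le (by omega)
    rw [h1, h2, h3]
    simp

-- ===== VERDICT (by name: the statement is the Claim_ definition above) =====
theorem solve_spec : Claim_equal_solve := by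
  intro A B C _ hpre
  unfold Spec_solve solve solve_alt
  by_cases h : B < C
  · obtain ⟨hB, hC⟩ := hpre h
    simp only [if_pos h]
    rw [solveLoop_eq A B C hB hC (by omega)]
    rw [PySem.List.slice_to A hB, PySem.List.slice_toNat A (by omega) (by omega),
        PySem.List.slice_from A (by omega)]
    have ht : (C + 1 - B).toNat = (C + 1).toNat - B.toNat := by omega
    rw [ht]
  · rw [if_neg h]
    unfold solveLoop
    rw [if_neg h]
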